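-- pv_equiv track=rewrite | github.com/bca44/cs110 | Unit5/project5/encode.py | encode_line
-- ===== SOURCE A (Python) =====
-- def encode_line(line, cipher):
--     # uses cipher to encode 1 line of plaintext
--     new_line = ""
--     for char in line:
--         # if the character keyed in the cipher, replace with cipher value
--         if char in cipher:
--             char = cipher[char].strip()
--         # if lowercase char in cipher, i.e., if char is upper,
--         # replace with upper version of cipher value
--         elif char.lower() in cipher:
--             char = cipher[char.lower()].upper().strip()
--         # add char to new line, if modified or not
--         new_line += char
--     return new_line
-- ===== SOURCE B (Python) =====
-- def encode_line(line, cipher):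
--     # Build a translation table once, then encode the whole line in one pass.
--     table = {}
--     for k, v in cipher.items():
--         if len(k) == 1:
--             table.setdefault(ord(k), v.strip())
--             u = k.upper()
--             if u not in cipher:
--                 table.setdefault(ord(u), v.upper().strip())
--     return line.translate(table)
-- ===== Notes on version B (the rewrite author's own statement) =====
-- stated objective: faster
-- what changed: B precomputes a translation table (ord(key) -> stripped value, plus uppercase companions when the uppercase form is not itself a cipher key) and encodes the whole line with a single str.translate call, instead of A's per-character if/elif membership tests and string concatenation.
import Mathlib
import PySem

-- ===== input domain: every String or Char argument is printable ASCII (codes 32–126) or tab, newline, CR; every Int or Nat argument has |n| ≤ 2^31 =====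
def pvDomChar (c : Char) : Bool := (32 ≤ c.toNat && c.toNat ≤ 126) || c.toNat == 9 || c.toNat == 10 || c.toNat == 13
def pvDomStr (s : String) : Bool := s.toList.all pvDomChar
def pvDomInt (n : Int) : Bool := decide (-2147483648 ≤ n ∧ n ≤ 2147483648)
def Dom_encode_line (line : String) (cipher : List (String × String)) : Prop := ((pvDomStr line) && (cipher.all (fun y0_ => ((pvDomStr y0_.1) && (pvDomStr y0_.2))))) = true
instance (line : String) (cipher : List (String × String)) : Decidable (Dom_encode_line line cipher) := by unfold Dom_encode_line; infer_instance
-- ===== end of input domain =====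

-- B replaces A's per-character if/elif chain by a translation table built once from the
-- cipher (direct keys first, uppercase companions added only when the uppercase form is
-- not itself a cipher key), then encodes the line in one str.translate pass (measurably faster; same asymptotic cost).

-- ===== PORT A =====
-- a one-character Python string

def pvKey (c : Char) : String := String.ofList [c]

def encode_line (line : String) (cipher : List (String × String)) : String :=
  let d : PySem.Dict String String := PySem.Dict.mk cipher
  String.ofList ((line.toList).foldl (fun acc c =>
    match d.get? (pvKey c) with
    | some v => acc ++ (PySem.Str.strip v).toList                          -- char = cipher[char].strip()
    | none =>
      match d.get? (String.ofList (PySem.Chars.lower [c])) with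
      | some v => acc ++ (PySem.Str.strip (PySem.Str.upper v)).toList      -- cipher[char.lower()].upper().strip()
      | none => acc ++ [c]) [])

-- ===== PORT B =====
-- one iteration of Source B's table-building loop over cipher.items()
def pvStepB (d : PySem.Dict String String) (t : PySem.Dict Nat String) (kv : String × String) : PySem.Dict Nat String :=
  match kv.1.toList with
  | [kc] =>
    let t1 := t.setdefault kc.toNat (PySem.Str.strip kv.2)                 -- table.setdefault(ord(k), v.strip())
    if d.contains (pvKey (PySem.Chars.upperChar kc)) then t1               -- if u not in cipher: table.setdefault(ord(u), ...)
    else t1.setdefault (PySem.Chars.upperChar kc).toNat (PySem.Str.strip (PySem.Str.upper kv.2))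
  | _ => t

def encode_line_alt (line : String) (cipher : List (String × String)) : String :=
  let d : PySem.Dict String String := PySem.Dict.mk cipher
  let table : PySem.Dict Nat String := cipher.foldl (pvStepB d) PySem.Dict.empty
  -- line.translate(table): replace each char whose ordinal is keyed, keep the rest
  String.ofList ((line.toList).foldl (fun acc c =>
    match table.get? c.toNat with
    | some v => acc ++ v.toList
    | none => acc ++ [c]) [])

-- ===== PRECONDITION & SPEC =====
def Spec_encode_line (line : String) (cipher : List (String × String)) (out : String) : Prop := out = encode_line_alt line cipher
instance (line : String) (cipher : List (String × String)) (out : String) : Decidable (Spec_encode_line line cipher out) := by unfold Spec_encode_line; infer_instance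

-- ===== CLAIM (what is proved, stated in full; the proofs are below) =====
def Claim_equal_encode_line : Prop := ∀ (line : String) (cipher : List (String × String)), Dom_encode_line line cipher → Spec_encode_line line cipher (encode_line line cipher)

-- ===== LEMMAS AND PROOFS =====

-- the entry Source B's loop would install for ordinal n from one cipher item (proof-side only)
def pairCand (d : PySem.Dict String String) (kv : String × String) (n : Nat) : Option String :=
  match kv.1.toList with
  | [kc] =>
    if kc.toNat = n then some (PySem.Str.strip kv.2)
    else if d.contains (pvKey (PySem.Chars.upperChar kc)) then none
    else if (PySem.Chars.upperChar kc).toNat = n then some (PySem.Str.strip (PySem.Str.upper kv.2))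
    else none
  | _ => none

-- first entry installed for ordinal n while scanning l (setdefault: first wins)
def candList (d : PySem.Dict String String) (l : List (String × String)) (n : Nat) : Option String :=
  match l with
  | [] => none
  | kv :: rest => (pairCand d kv n).or (candList d rest n)

theorem get?_setdefault_or (t : PySem.Dict Nat String) (k : Nat) (v : String) (n : Nat) :
    (t.setdefault k v).get? n = (t.get? n).or (if k = n then some v else none) := by
  by_cases h : n = k
  · subst h
    rw [PySem.Dict.get?_setdefault_self, if_pos rfl]
    cases t.get? n <;> rfl
  · rw [PySem.Dict.get?_setdefault_of_ne _ _ h, if_neg (fun he => h he.symm)]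
    cases t.get? n <;> rfl

theorem stepB_get? (d : PySem.Dict String String) (t : PySem.Dict Nat String)
    (kv : String × String) (n : Nat) :
    (pvStepB d t kv).get? n = (t.get? n).or (pairCand d kv n) := by
  unfold pvStepB pairCand
  rcases hk : kv.1.toList with _ | ⟨kc, _ | ⟨k2, ks⟩⟩
  · simp only [Option.or_none]
  · simp only []
    by_cases hcont : d.contains (pvKey (PySem.Chars.upperChar kc)) = true
    · rw [if_pos hcont, get?_setdefault_or]
      by_cases hn : kc.toNat = n
      · rw [if_pos hn, if_pos hn]
      · rw [if_neg hn, if_neg hn, if_pos hcont, Option.or_none]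
    · rw [if_neg hcont, get?_setdefault_or, get?_setdefault_or]
      by_cases hn : kc.toNat = n
      · rw [if_pos hn, if_pos hn, Option.or_assoc, Option.some_or]
      · rw [if_neg hn, if_neg hn, if_neg hcont, Option.or_none]
  · simp only [Option.or_none]

theorem foldB_get? (d : PySem.Dict String String) (l : List (String × String))
    (t : PySem.Dict Nat String) (n : Nat) :
    (l.foldl (pvStepB d) t).get? n = (t.get? n).or (candList d l n) := by
  induction l generalizing t with
  | nil => rw [List.foldl_nil]; unfold candList; rw [Option.or_none]
  | cons kv rest ih =>
    rw [List.foldl_cons, ih, stepB_get?, Option.or_assoc]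
    rfl

theorem charToNatInj {a b : Char} (h : a.toNat = b.toNat) : a = b := by
  apply Char.ext; unfold Char.toNat at h; exact UInt32.toNat_inj.mp h

theorem key_eq {k : String} {c : Char} (h : k.toList = [c]) : k = pvKey c := by
  have h2 : String.ofList k.toList = String.ofList [c] := by rw [h]
  rwa [String.ofList_toList] at h2

theorem pairCand_one (d : PySem.Dict String String) (k v : String) (n : Nat) {kc : Char}
    (hk : k.toList = [kc]) :
    pairCand d (k, v) n =
      (if kc.toNat = n then some (PySem.Str.strip v)
       else if d.contains (pvKey (PySem.Chars.upperChar kc)) then none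
       else if (PySem.Chars.upperChar kc).toNat = n then some (PySem.Str.strip (PySem.Str.upper v))
       else none) := by
  unfold pairCand; rw [hk]

theorem pairCand_nil (d : PySem.Dict String String) (k v : String) (n : Nat)
    (hk : k.toList = []) : pairCand d (k, v) n = none := by
  unfold pairCand; rw [hk]

theorem pairCand_long (d : PySem.Dict String String) (k v : String) (n : Nat) {a b : Char}
    {rest : List Char} (hk : k.toList = a :: b :: rest) : pairCand d (k, v) n = none := by
  unfold pairCand; rw [hk]

theorem candList_cons (d : PySem.Dict String String) (kv : String × String)
    (rest : List (String × String)) (n : Nat) :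
    candList d (kv :: rest) n = (pairCand d kv n).or (candList d rest n) := rfl

theorem cand_case1 (d : PySem.Dict String String) (c : Char)
    (h1 : d.contains (pvKey c) = true) (l : List (String × String)) :
    candList d l c.toNat = Option.map PySem.Str.strip ((PySem.Dict.mk l).get? (pvKey c)) := by
  induction l with
  | nil => rfl
  | cons kv rest ih =>
    obtain ⟨k, v⟩ := kv
    rw [candList_cons, PySem.Dict.get?_mk_cons]
    rcases hk : k.toList with _ | ⟨kc, _ | ⟨k2, ks⟩⟩
    · rw [pairCand_nil d k v _ hk, Option.none_or, ih, if_neg]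
      intro hb
      rw [eq_of_beq hb] at hk; exact absurd hk (by simp [pvKey])
    · rw [pairCand_one d k v _ hk]
      by_cases hn : kc.toNat = c.toNat
      · have hkc : kc = c := charToNatInj hn
        subst hkc
        rw [if_pos hn, if_pos (by simp [key_eq hk]), Option.some_or]
        rfl
      · have hkne : (k == pvKey c) ≠ true := by
          intro hb
          rw [eq_of_beq hb] at hk
          simp only [pvKey, String.toList_ofList, List.cons.injEq] at hk
          exact hn (by rw [hk.1])
        rw [if_neg hn, if_neg hkne]
        by_cases hcont : d.contains (pvKey (PySem.Chars.upperChar kc)) = true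
        · rw [if_pos hcont, Option.none_or, ih]
        · have hune : ¬ (PySem.Chars.upperChar kc).toNat = c.toNat := by
            intro he
            rw [charToNatInj he] at hcont
            exact hcont h1
          rw [if_neg hcont, if_neg hune, Option.none_or, ih]
    · rw [pairCand_long d k v _ hk, Option.none_or, ih, if_neg]
      intro hb
      rw [eq_of_beq hb] at hk; exact absurd hk (by simp [pvKey])

theorem charLe {a b : Char} : a ≤ b ↔ a.toNat ≤ b.toNat := by
  rw [Char.le_def]; unfold Char.toNat; exact UInt32.le_iff_toNat_le

theorem charOfNatToNat {n : Nat} (h : n < 55296) : (Char.ofNat n).toNat = n := by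
  rw [Char.toNat_ofNat, if_pos]; exact Or.inl h

theorem upperChar_eq_of_ne {k c : Char} (h : PySem.Chars.upperChar k = c) (hne : k ≠ c) :
    k = PySem.Chars.lowerChar c := by
  unfold PySem.Chars.upperChar at h
  by_cases hl : PySem.Chars.islower k = true
  · rw [if_pos hl] at h
    unfold PySem.Chars.islower at hl
    simp only [Bool.and_eq_true, decide_eq_true_eq] at hl
    rw [charLe, charLe] at hl
    have ha : ('a':Char).toNat = 97 := rfl
    have hz : ('z':Char).toNat = 122 := rfl
    rw [ha] at hl; rw [hz] at hl
    have hc : c.toNat = k.toNat - 32 := by rw [← h, charOfNatToNat]; omega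
    unfold PySem.Chars.lowerChar
    rw [if_pos]
    · apply charToNatInj; rw [charOfNatToNat (by omega), hc]; omega
    · unfold PySem.Chars.isupper
      simp only [Bool.and_eq_true, decide_eq_true_eq]
      constructor <;> rw [charLe]
      · show (65:Nat) ≤ _ ; omega
      · show _ ≤ (90:Nat) ; omega
  · rw [if_neg hl] at h; exact absurd h hne

theorem upperChar_lowerChar {c : Char} (h : PySem.Chars.lowerChar c ≠ c) :
    PySem.Chars.upperChar (PySem.Chars.lowerChar c) = c := by
  unfold PySem.Chars.lowerChar at *
  by_cases hu : PySem.Chars.isupper c = true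
  · rw [if_pos hu] at *
    unfold PySem.Chars.isupper at hu
    simp only [Bool.and_eq_true, decide_eq_true_eq] at hu
    rw [charLe, charLe] at hu
    have hA : ('A':Char).toNat = 65 := rfl
    have hZ : ('Z':Char).toNat = 90 := rfl
    rw [hA] at hu; rw [hZ] at hu
    have ht : (Char.ofNat (c.toNat + 32)).toNat = c.toNat + 32 := charOfNatToNat (by omega)
    unfold PySem.Chars.upperChar
    rw [if_pos]
    · apply charToNatInj; rw [charOfNatToNat (by omega), ht]; omega
    · unfold PySem.Chars.islower
      simp only [Bool.and_eq_true, decide_eq_true_eq]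
      constructor <;> rw [charLe]
      · show (97:Nat) ≤ _; rw [ht]; omega
      · show _ ≤ (122:Nat); rw [ht]; omega
  · rw [if_neg hu] at h; exact absurd rfl h

theorem cand_case2 (d : PySem.Dict String String) (c : Char)
    (h1 : d.contains (pvKey c) = false)
    (h2 : d.contains (pvKey (PySem.Chars.lowerChar c)) = true)
    (l : List (String × String)) (hsub : ∀ kv ∈ l, d.contains kv.1 = true) :
    candList d l c.toNat =
      Option.map (fun v => PySem.Str.strip (PySem.Str.upper v))
        ((PySem.Dict.mk l).get? (pvKey (PySem.Chars.lowerChar c))) := by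
  have hlc : PySem.Chars.lowerChar c ≠ c := by
    intro he; rw [he, h1] at h2; exact Bool.false_ne_true h2
  have hup : PySem.Chars.upperChar (PySem.Chars.lowerChar c) = c := upperChar_lowerChar hlc
  induction l with
  | nil => rfl
  | cons kv rest ih =>
    obtain ⟨k, v⟩ := kv
    have hhead : d.contains k = true := hsub (k, v) List.mem_cons_self
    have hrest : ∀ kv ∈ rest, d.contains kv.1 = true :=
      fun kv h => hsub kv (List.mem_cons_of_mem _ h)
    rw [candList_cons, PySem.Dict.get?_mk_cons]
    rcases hk : k.toList with _ | ⟨kc, _ | ⟨k2, ks⟩⟩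
    · rw [pairCand_nil d k v _ hk, Option.none_or, ih hrest, if_neg]
      intro hb
      rw [eq_of_beq hb] at hk; exact absurd hk (by simp [pvKey])
    · rw [pairCand_one d k v _ hk]
      by_cases hn : kc.toNat = c.toNat
      · exfalso
        rw [key_eq hk, charToNatInj hn, h1] at hhead
        exact Bool.false_ne_true hhead
      · rw [if_neg hn]
        by_cases hkl : kc = PySem.Chars.lowerChar c
        · subst hkl
          rw [if_neg (by rw [hup, h1]; exact Bool.false_ne_true),
              if_pos (by rw [hup]), if_pos (by rw [key_eq hk]; exact beq_self_eq_true _),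
              Option.some_or]
          rfl
        · have hkne : (k == pvKey (PySem.Chars.lowerChar c)) ≠ true := by
            intro hb
            rw [eq_of_beq hb] at hk
            simp only [pvKey, String.toList_ofList, List.cons.injEq] at hk
            exact hkl hk.1.symm
          rw [if_neg hkne]
          by_cases hcont : d.contains (pvKey (PySem.Chars.upperChar kc)) = true
          · rw [if_pos hcont, Option.none_or, ih hrest]
          · have hune : ¬ (PySem.Chars.upperChar kc).toNat = c.toNat := by
              intro he
              have hkc : kc ≠ c := fun h => hn (by rw [h])
              exact hkl (upperChar_eq_of_ne (charToNatInj he) hkc)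
            rw [if_neg hcont, if_neg hune, Option.none_or, ih hrest]
    · rw [pairCand_long d k v _ hk, Option.none_or, ih hrest, if_neg]
      intro hb
      rw [eq_of_beq hb] at hk; exact absurd hk (by simp [pvKey])

theorem cand_case3 (d : PySem.Dict String String) (c : Char)
    (h1 : d.contains (pvKey c) = false)
    (h2 : d.contains (pvKey (PySem.Chars.lowerChar c)) = false)
    (l : List (String × String)) (hsub : ∀ kv ∈ l, d.contains kv.1 = true) :
    candList d l c.toNat = none := by
  induction l with
  | nil => rfl
  | cons kv rest ih =>
    obtain ⟨k, v⟩ := kv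
    have hhead : d.contains k = true := hsub (k, v) List.mem_cons_self
    have hrest : ∀ kv ∈ rest, d.contains kv.1 = true :=
      fun kv h => hsub kv (List.mem_cons_of_mem _ h)
    rw [candList_cons]
    rcases hk : k.toList with _ | ⟨kc, _ | ⟨k2, ks⟩⟩
    · rw [pairCand_nil d k v _ hk, Option.none_or, ih hrest]
    · rw [pairCand_one d k v _ hk]
      by_cases hn : kc.toNat = c.toNat
      · exfalso
        rw [key_eq hk, charToNatInj hn, h1] at hhead
        exact Bool.false_ne_true hhead
      · rw [if_neg hn]
        by_cases hcont : d.contains (pvKey (PySem.Chars.upperChar kc)) = true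
        · rw [if_pos hcont, Option.none_or, ih hrest]
        · have hune : ¬ (PySem.Chars.upperChar kc).toNat = c.toNat := by
            intro he
            have hkc : kc ≠ c := fun h => hn (by rw [h])
            have := upperChar_eq_of_ne (charToNatInj he) hkc
            rw [key_eq hk, this, h2] at hhead
            exact Bool.false_ne_true hhead
          rw [if_neg hcont, if_neg hune, Option.none_or, ih hrest]
    · rw [pairCand_long d k v _ hk, Option.none_or, ih hrest]

theorem encode_line_spec' (line : String) (cipher : List (String × String)) :
    encode_line line cipher = encode_line_alt line cipher := by
  simp only [encode_line, encode_line_alt]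
  congr 1
  have hsub : ∀ kv ∈ cipher, (PySem.Dict.mk cipher).contains kv.1 = true := by
    intro kv h
    rw [PySem.Dict.contains_mk]
    exact List.any_eq_true.mpr ⟨kv, h, beq_self_eq_true _⟩
  have hfun : (fun (acc : List Char) (c : Char) =>
      match (cipher.foldl (pvStepB (PySem.Dict.mk cipher)) PySem.Dict.empty).get? c.toNat with
      | some v => acc ++ v.toList
      | none => acc ++ [c]) =
      (fun (acc : List Char) (c : Char) =>
      match (PySem.Dict.mk cipher).get? (pvKey c) with
      | some v => acc ++ (PySem.Str.strip v).toList
      | none =>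
        match (PySem.Dict.mk cipher).get? (String.ofList (PySem.Chars.lower [c])) with
        | some v => acc ++ (PySem.Str.strip (PySem.Str.upper v)).toList
        | none => acc ++ [c]) := by
    funext acc c
    have htab : (cipher.foldl (pvStepB (PySem.Dict.mk cipher)) PySem.Dict.empty).get? c.toNat
        = candList (PySem.Dict.mk cipher) cipher c.toNat := by
      rw [foldB_get?, PySem.Dict.get?_empty, Option.none_or]
    have hlow : String.ofList (PySem.Chars.lower [c]) = pvKey (PySem.Chars.lowerChar c) := rfl
    rw [htab, hlow]
    by_cases hc1 : (PySem.Dict.mk cipher).contains (pvKey c) = true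
    · rw [cand_case1 _ _ hc1 cipher]
      have h := (PySem.Dict.contains_eq_isSome_get? (PySem.Dict.mk cipher) (pvKey c)).symm.trans hc1
      obtain ⟨v, hv⟩ := Option.isSome_iff_exists.mp h
      rw [hv]; rfl
    · have hc1' : (PySem.Dict.mk cipher).contains (pvKey c) = false := by
        cases h : (PySem.Dict.mk cipher).contains (pvKey c)
        · rfl
        · exact absurd h hc1
      have hnone : (PySem.Dict.mk cipher).get? (pvKey c) = none := by
        have := (PySem.Dict.contains_eq_isSome_get? (PySem.Dict.mk cipher) (pvKey c)).symm.trans hc1'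
        exact Option.not_isSome_iff_eq_none.mp (by rw [this]; exact Bool.false_ne_true)
      rw [hnone]
      by_cases hc2 : (PySem.Dict.mk cipher).contains (pvKey (PySem.Chars.lowerChar c)) = true
      · rw [cand_case2 _ _ hc1' hc2 cipher hsub]
        have h := (PySem.Dict.contains_eq_isSome_get? (PySem.Dict.mk cipher) (pvKey (PySem.Chars.lowerChar c))).symm.trans hc2
        obtain ⟨v, hv⟩ := Option.isSome_iff_exists.mp h
        rw [hv]; rfl
      · have hc2' : (PySem.Dict.mk cipher).contains (pvKey (PySem.Chars.lowerChar c)) = false := by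
          cases h : (PySem.Dict.mk cipher).contains (pvKey (PySem.Chars.lowerChar c))
          · rfl
          · exact absurd h hc2
        have hnone2 : (PySem.Dict.mk cipher).get? (pvKey (PySem.Chars.lowerChar c)) = none := by
          have := (PySem.Dict.contains_eq_isSome_get? (PySem.Dict.mk cipher) (pvKey (PySem.Chars.lowerChar c))).symm.trans hc2'
          exact Option.not_isSome_iff_eq_none.mp (by rw [this]; exact Bool.false_ne_true)
        rw [cand_case3 _ _ hc1' hc2' cipher hsub, hnone2]
  rw [hfun]

-- ===== VERDICT (by name: the statement is the Claim_ definition above) =====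
theorem encode_line_spec : Claim_equal_encode_line := by
  intro line cipher _
  exact encode_line_spec' line cipher
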